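-- pv_equiv track=rewrite | github.com/ahmd-kamel/Quine-McCluskey-Boolean-Minimizer | maccluskey_minimization.py | group_minterms
-- ===== SOURCE A (Python) =====
-- def count_ones_in_minterm(minterm):
--     return minterm.count(1)
--
-- def group_minterms(minterms):
--     grouped_minterms = {}
--     for minterm in minterms:
--         num_ones = count_ones_in_minterm(minterm)
--         if num_ones not in grouped_minterms:
--             grouped_minterms[num_ones] = []
--         grouped_minterms[num_ones].append(minterm)
--     return grouped_minterms
-- ===== SOURCE B (Python) =====
-- def count_ones_in_minterm(minterm):
--     return minterm.count(1)
--
-- def group_minterms(minterms):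
--     keys = list(dict.fromkeys(count_ones_in_minterm(m) for m in minterms))
--     return {k: [m for m in minterms if count_ones_in_minterm(m) == k] for k in keys}
-- ===== Notes on version B (the rewrite author's own statement) =====
-- stated objective: alternative
-- what changed: B replaces A's single-pass dict bucketing (create-bucket-then-append per element) by a two-phase plan: first an ordered dedup of the ones-counts (dict.fromkeys), then one filter pass per distinct count building each group as a comprehension.
import Mathlib
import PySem

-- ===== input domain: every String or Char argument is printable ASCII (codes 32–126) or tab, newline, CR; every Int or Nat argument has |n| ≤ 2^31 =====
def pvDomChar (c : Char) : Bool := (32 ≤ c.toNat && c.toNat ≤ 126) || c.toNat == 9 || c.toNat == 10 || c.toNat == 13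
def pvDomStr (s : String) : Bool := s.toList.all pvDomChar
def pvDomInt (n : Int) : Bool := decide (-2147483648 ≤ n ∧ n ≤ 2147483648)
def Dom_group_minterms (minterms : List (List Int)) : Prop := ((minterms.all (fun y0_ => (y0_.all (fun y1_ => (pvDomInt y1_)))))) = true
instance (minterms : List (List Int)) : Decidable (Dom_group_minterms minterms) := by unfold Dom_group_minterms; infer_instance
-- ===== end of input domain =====

-- B groups minterms by ones-count via an ordered dedup of the counts followed by one filter pass
-- per distinct count, instead of A's single-pass dict bucketing; alternative decomposition, same results.


-- ===== PORT A =====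
def count_ones_in_minterm (minterm : List Int) : Int :=
  (PySem.List.count minterm 1 : Int)

-- A's loop body: ensure the bucket exists, then append the minterm to it.
def pvStepA (d : PySem.Dict Int (List (List Int))) (minterm : List Int) : PySem.Dict Int (List (List Int)) :=
  let num_ones := count_ones_in_minterm minterm
  let d := if d.contains num_ones then d else d.insert num_ones []
  d.modify num_ones [] (fun l => l ++ [minterm])

def group_minterms (minterms : List (List Int)) : List (Int × List (List Int)) :=
  (minterms.foldl pvStepA PySem.Dict.empty).items

-- ===== PORT B =====
def group_minterms_alt (minterms : List (List Int)) : List (Int × List (List Int)) :=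
  let keys := PySem.List.dedup (minterms.map count_ones_in_minterm)
  keys.map (fun k => (k, minterms.filter (fun m => count_ones_in_minterm m == k)))

-- ===== PRECONDITION & SPEC =====
def Spec_group_minterms (minterms : List (List Int)) (out : List (Int × List (List Int))) : Prop := out = group_minterms_alt minterms
instance (minterms : List (List Int)) (out : List (Int × List (List Int))) : Decidable (Spec_group_minterms minterms out) := by unfold Spec_group_minterms; infer_instance

-- ===== CLAIM (what is proved, stated in full; the proofs are below) =====
def Claim_equal_group_minterms : Prop := ∀ (minterms : List (List Int)), Dom_group_minterms minterms → Spec_group_minterms minterms (group_minterms minterms)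

-- ===== LEMMAS AND PROOFS =====

theorem pvStepA_keys (d : PySem.Dict Int (List (List Int))) (m : List Int) :
    (pvStepA d m).keys = PySem.Set.add d.keys (count_ones_in_minterm m) := by
  unfold pvStepA
  by_cases hc : d.contains (count_ones_in_minterm m) = true
  · simp only [hc, if_true, PySem.Dict.keys_modify, PySem.Dict.keys_insert_of_contains d _ hc,
      PySem.Set.add]
    rw [if_pos ((PySem.Set.contains_iff _ _).mpr ((PySem.Dict.contains_iff_mem_keys d _).mp hc))]
  · rw [Bool.not_eq_true] at hc
    simp only [hc, Bool.false_eq_true, if_false, PySem.Dict.keys_modify]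
    rw [PySem.Dict.keys_insert_of_contains _ _
      (by simp),
      PySem.Dict.keys_insert_of_not_contains d _ hc, PySem.Set.add,
      if_neg (fun hmem => by
        rw [(PySem.Dict.contains_iff_mem_keys d _).mpr ((PySem.Set.contains_iff _ _).mp hmem)] at hc
        cases hc)]

theorem pvStepA_getD (d : PySem.Dict Int (List (List Int))) (m : List Int) (c : Int) :
    (pvStepA d m).getD c [] =
      if c = count_ones_in_minterm m then d.getD c [] ++ [m] else d.getD c [] := by
  unfold pvStepA
  by_cases hc : d.contains (count_ones_in_minterm m) = true
  · simp only [hc, if_true, PySem.Dict.getD_modify]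
    by_cases h : c = count_ones_in_minterm m
    · simp [h]
    · simp [h]
  · rw [Bool.not_eq_true] at hc
    simp only [hc, Bool.false_eq_true, if_false, PySem.Dict.getD_modify, PySem.Dict.getD_insert]
    by_cases h : c = count_ones_in_minterm m
    · simp [h, PySem.Dict.getD_of_not_contains d [] hc]
    · simp [h]

theorem pvFold_keys (xs : List (List Int)) : ∀ d : PySem.Dict Int (List (List Int)),
    (xs.foldl pvStepA d).keys = PySem.Set.update d.keys (xs.map count_ones_in_minterm) := by
  induction xs with
  | nil => intro d; rfl
  | cons x xs ih =>
    intro d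
    rw [List.foldl_cons, ih (pvStepA d x), List.map_cons]
    rw [pvStepA_keys]
    rfl

theorem pvFold_nodup (xs : List (List Int)) : ∀ d : PySem.Dict Int (List (List Int)),
    d.keys.Nodup → (xs.foldl pvStepA d).keys.Nodup := by
  induction xs with
  | nil => intro d h; exact h
  | cons x xs ih =>
    intro d h
    rw [List.foldl_cons]
    refine ih _ ?_
    rw [pvStepA_keys, PySem.Set.add]
    split_ifs with hmem
    · exact h
    · rw [Bool.not_eq_true, ← Bool.not_eq_true] at hmem
      have hmem' : count_ones_in_minterm x ∉ d.keys :=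
        fun hm => hmem ((PySem.Set.contains_iff _ _).mpr hm)
      simp [List.nodup_append, h]
      intro a ha heq
      exact hmem' (heq ▸ ha)

theorem pvFold_getD (xs : List (List Int)) : ∀ (d : PySem.Dict Int (List (List Int))) (c : Int),
    (xs.foldl pvStepA d).getD c [] =
      d.getD c [] ++ xs.filter (fun m => count_ones_in_minterm m == c) := by
  induction xs with
  | nil => intro d c; simp
  | cons x xs ih =>
    intro d c
    rw [List.foldl_cons, ih (pvStepA d x) c, pvStepA_getD, List.filter_cons]
    by_cases h : c = count_ones_in_minterm x
    · simp [h]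
    · rw [if_neg h, if_neg (by simp; exact fun hh => h hh.symm)]

-- ===== VERDICT (by name: the statement is the Claim_ definition above) =====
theorem group_minterms_spec : Claim_equal_group_minterms := by
  intro minterms _
  unfold Spec_group_minterms group_minterms group_minterms_alt
  rw [PySem.Dict.items_eq_map_keys _ (pvFold_nodup minterms _ (by simp)) []]
  rw [pvFold_keys]
  have hkeys : PySem.Set.update (PySem.Dict.empty (κ := Int) (ν := List (List Int))).keys
      (minterms.map count_ones_in_minterm)
      = PySem.List.dedup (minterms.map count_ones_in_minterm) := by
    rw [PySem.Dict.keys_empty, PySem.List.dedup_eq_ofList]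
    rfl
  rw [hkeys]
  refine List.map_congr_left ?_
  intro k _
  rw [pvFold_getD, PySem.Dict.getD_empty, List.nil_append]
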